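-- pv_equiv track=rewrite | github.com/LisetAlfaro/Simulacion_FuzziLogic | difuzzifier.py | med_max
-- ===== SOURCE A (Python) =====
-- def med_max(f):
--     m = f[0]
--     x = []
--     for i in range((len(f))):
--         if f[i] > m:
--             x.clear()
--             m = f[i]
--         if f[i] == m:
--             x.append(i)
--     return x[int(len(x)/2)]
-- ===== SOURCE B (Python) =====
-- def med_max(f):
--     m = max(f)
--     idx = [i for i, v in enumerate(f) if v == m]
--     return idx[len(idx) // 2]
-- ===== Notes on version B (the rewrite author's own statement) =====
-- stated objective: simpler
-- what changed: Replaces the online clear-and-rebuild running-max scan over indices with a global max(f) followed by a separate comprehension collecting the indices of the maximum; the middle index is then picked the same way.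
import Mathlib
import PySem

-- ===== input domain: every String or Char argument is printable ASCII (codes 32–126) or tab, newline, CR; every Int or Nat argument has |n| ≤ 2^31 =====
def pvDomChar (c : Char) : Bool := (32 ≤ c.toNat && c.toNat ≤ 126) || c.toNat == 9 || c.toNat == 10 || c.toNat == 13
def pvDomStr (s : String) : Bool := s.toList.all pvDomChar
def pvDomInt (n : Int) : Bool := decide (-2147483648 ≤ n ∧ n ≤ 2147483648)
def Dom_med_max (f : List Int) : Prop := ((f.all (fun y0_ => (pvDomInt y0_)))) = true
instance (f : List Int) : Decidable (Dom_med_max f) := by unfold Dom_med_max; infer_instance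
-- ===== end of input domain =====

-- B is a simpler two-pass version (global max, then index collection); return values only, no mutation.

-- ===== PORT A =====
-- loop body: 'if f[i] > m: x.clear(); m = f[i]' then 'if f[i] == m: x.append(i)'
def medStep (st : Int × List Int) (p : Int × Int) : Int × List Int :=
  let st1 := if p.2 > st.1 then (p.2, ([] : List Int)) else st
  if p.2 = st1.1 then (st1.1, st1.2 ++ [p.1]) else st1

def med_max (f : List Int) : Int :=
  let m0 := (PySem.List.pyGet? f 0).getD 0      -- f[0]; IndexError on [] excluded by Pre_
  let st := (PySem.List.pyRange 0 (f.length : Int) 1).foldl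
      (fun st i => medStep st (i, PySem.List.pyGetD f i 0)) (m0, ([] : List Int))
  let x := st.2
  -- int(len(x)/2) = len(x) // 2 exactly: division by 2 is exact in binary floating point and int() truncates (len ≥ 0)
  (PySem.List.pyGet? x ((x.length / 2 : Nat) : Int)).getD 0

-- ===== PORT B =====
def med_max_alt (f : List Int) : Int :=
  match PySem.List.max? f (fun y => y) with
  | none => 0                                    -- max([]) raises ValueError; excluded by Pre_
  | some m =>
    let idx := (PySem.List.enumerate f 0).filterMap
        (fun p => if p.2 = m then some p.1 else none)
    (PySem.List.pyGet? idx ((idx.length / 2 : Nat) : Int)).getD 0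

-- ===== PRECONDITION & SPEC =====
-- Pre_ excludes only the empty list, on which A raises IndexError (f[0]).
def Pre_med_max (f : List Int) : Prop := f ≠ []
instance (f : List Int) : Decidable (Pre_med_max f) := by unfold Pre_med_max; infer_instance
def pvWitness_med_max : List Int := [1, 3, 2, 3]

def Spec_med_max (f : List Int) (out : Int) : Prop := out = med_max_alt f
instance (f : List Int) (out : Int) : Decidable (Spec_med_max f out) := by unfold Spec_med_max; infer_instance

-- ===== CLAIM (what is proved, stated in full; the proofs are below) =====
def Claim_equal_med_max : Prop := ∀ (f : List Int), Dom_med_max f → Pre_med_max f → Spec_med_max f (med_max f)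

-- ===== LEMMAS AND PROOFS =====

-- A's index loop over range(len(f)) with f[i] is the fold over enumerate(f)
lemma foldl_range_enum (g : Int × List Int → Int × Int → Int × List Int) :
    ∀ (t pre : List Int) (st : Int × List Int),
      (PySem.List.pyRange (pre.length : Int) ((pre.length + t.length : Nat) : Int) 1).foldl
        (fun st i => g st (i, PySem.List.pyGetD (pre ++ t) i 0)) st
      = (PySem.List.enumerate t (pre.length : Int)).foldl g st := by
  intro t
  induction t with
  | nil =>
    intro pre st
    rw [PySem.List.pyRange_one_eq_nil (by simp)]
    simp [PySem.List.enumerate_nil]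
  | cons v t' ih =>
    intro pre st
    rw [PySem.List.pyRange_one_cons (by simp only [List.length_cons]; push_cast; omega)]
    simp only [List.foldl_cons, PySem.List.enumerate_cons]
    have hget : PySem.List.pyGetD (pre ++ v :: t') (pre.length : Int) 0 = v := by
      rw [PySem.List.pyGetD_natCast]
      simp [List.getD]
    rw [hget]
    have := ih (pre ++ [v]) (g st ((pre.length : Int), v))
    simp only [List.length_append, List.length_cons, List.length_nil] at this ⊢
    have harr : pre ++ [v] ++ t' = pre ++ v :: t' := by simp
    rw [harr] at this
    have h1 : ((pre.length + 1 : Nat) : Int) = (pre.length : Int) + 1 := by push_cast; ring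
    rw [h1] at this
    have h2 : ((pre.length + (t'.length + 1) : Nat) : Int) = ((pre.length + 1 + t'.length : Nat) : Int) := by
      push_cast; ring
    rw [h2]
    exact this

-- invariant of A's loop: running state becomes (max so far, indices equal to the final max)
lemma medStep_inv :
    ∀ (t : List Int) (a m : Int) (x : List Int),
      (PySem.List.enumerate t a).foldl medStep (m, x)
      = (t.foldl max m,
         (if t.foldl max m = m then x else []) ++
         (PySem.List.enumerate t a).filterMap
           (fun p => if p.2 = t.foldl max m then some p.1 else none)) := by
  intro t
  induction t with
  | nil => intro a m x; simp [PySem.List.enumerate_nil]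
  | cons v t' ih =>
    intro a m x
    rw [PySem.List.enumerate_cons]
    simp only [List.foldl_cons, List.filterMap_cons, List.foldl_cons]
    by_cases hvm : v > m
    · have hstep : medStep (m, x) (a, v) = (v, [a]) := by
        simp [medStep, hvm]
      rw [hstep, ih]
      have hmax : max m v = v := by omega
      simp only [hmax]
      have hMv : v ≤ t'.foldl max v := (PySem.List.le_foldl_max t' v).1
      have hne : t'.foldl max v ≠ m := by omega
      rw [if_neg hne]
      by_cases hM : t'.foldl max v = v
      · simp [hM]
      · rw [if_neg (fun h => hM (Eq.symm h))]
        simp [hM]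
    · have hmax : max m v = m := by omega
      simp only [hmax]
      by_cases hve : v = m
      · have hstep : medStep (m, x) (a, v) = (m, x ++ [a]) := by
          simp [medStep, hve]
        rw [hstep, ih]
        by_cases hM : t'.foldl max m = m
        · rw [if_pos hM, if_pos hM, if_pos (by rw [hve, hM]), List.append_assoc]
          rfl
        · rw [if_neg hM, if_neg hM, if_neg (by rw [hve]; exact fun h => hM h.symm)]
      · have hstep : medStep (m, x) (a, v) = (m, x) := by
          simp [medStep, hvm, hve]
        rw [hstep, ih]
        have hmM : m ≤ t'.foldl max m := (PySem.List.le_foldl_max t' m).1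
        have hvne : v ≠ t'.foldl max m := by omega
        rw [if_neg hvne]

-- ===== VERDICT (by name: the statement is the Claim_ definition above) =====
theorem med_max_spec : Claim_equal_med_max := by
  intro f _ hpre
  unfold Spec_med_max
  obtain ⟨h, t, rfl⟩ : ∃ h t, f = h :: t := by
    cases f with
    | nil => exact absurd rfl hpre
    | cons h t => exact ⟨h, t, rfl⟩
  unfold med_max med_max_alt
  rw [PySem.List.max?_id_cons]
  have hm0 : (PySem.List.pyGet? (h :: t) 0).getD 0 = h := by
    simp [PySem.List.pyGet?, PySem.List.pyIdx?]
  rw [hm0]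
  simp only []
  have hrange := foldl_range_enum medStep (h :: t) [] (h, [])
  simp only [List.length_nil, List.nil_append, Nat.cast_zero, Nat.zero_add] at hrange
  rw [hrange, medStep_inv]
  have hfold : (h :: t).foldl max h = t.foldl max h := by
    simp [List.foldl_cons]
  rw [hfold]
  by_cases hM : t.foldl max h = h <;> simp [hM]
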